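-- pv_equiv track=rewrite | github.com/FranciscoJimenezJimenez24/CalendarioAdvientoPY2025 | dia7.py | draw_tree
-- ===== SOURCE A (Python) =====
-- def draw_tree(height, ornament, frequency):
--   tree = ""
--   frequencyOrnament = frequency
--   for i in range (height):
--     tree += " "*(height-(i+1))
--     for j in range(2*(i+1)-1):
--       if (frequencyOrnament == 1):
--         tree += ornament
--         frequencyOrnament = frequency
--       else:
--         tree += "*"
--         frequencyOrnament -= 1
--     tree += "\n"
--   return tree + " "*(height-1) + "#"
-- ===== SOURCE B (Python) =====
-- def draw_tree(height, ornament, frequency):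
--     h = max(height, 0)
--     # one flat pass generates all h*h pattern pieces with the decrementing counter
--     pieces = []
--     counter = frequency
--     for _ in range(h * h):
--         if counter == 1:
--             pieces.append(ornament)
--             counter = frequency
--         else:
--             pieces.append("*")
--             counter -= 1
--     # partition the flat pattern into the triangle's rows
--     out = []
--     pos = 0
--     for i in range(h):
--         n = 2 * i + 1
--         out.append(" " * (h - 1 - i) + "".join(pieces[pos:pos + n]) + "\n")
--         pos += n
--     return "".join(out) + " " * (height - 1) + "#"
-- ===== Notes on version B (the rewrite author's own statement) =====
-- stated objective: alternative
-- what changed: Replaced the nested row-by-row loops that grow one string with a single flat pass generating all height*height pattern pieces with the counter, followed by a separate pass that slices the flat pattern into indented rows.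
import Mathlib
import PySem

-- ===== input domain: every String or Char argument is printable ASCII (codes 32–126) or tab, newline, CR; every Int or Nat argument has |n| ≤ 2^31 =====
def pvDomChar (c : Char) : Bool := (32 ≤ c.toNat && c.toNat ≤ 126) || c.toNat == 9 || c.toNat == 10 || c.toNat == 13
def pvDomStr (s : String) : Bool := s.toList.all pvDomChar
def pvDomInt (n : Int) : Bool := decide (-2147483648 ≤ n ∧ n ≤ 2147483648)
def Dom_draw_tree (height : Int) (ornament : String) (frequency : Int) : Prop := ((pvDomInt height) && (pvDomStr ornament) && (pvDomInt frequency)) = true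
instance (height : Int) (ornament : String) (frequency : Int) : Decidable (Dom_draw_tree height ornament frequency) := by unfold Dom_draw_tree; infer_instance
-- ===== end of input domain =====

-- B replaces A's nested row-building loops by one flat counter pass over height*height
-- pieces plus a separate pass that slices the flat pattern into indented rows (alternative
-- decomposition, same cost).


-- ===== PORT A =====
-- strings are ported on the List Char side (PySem convention); " "*k is replicate k.toNat
def draw_tree (height : Int) (ornament : String) (frequency : Int) : String :=
  let res := (PySem.List.pyRange 0 height 1).foldl
    (fun st i =>
      let st1 : List Char × Int := (st.1 ++ List.replicate (height - (i + 1)).toNat ' ', st.2)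
      let st2 := (PySem.List.pyRange 0 (2 * (i + 1) - 1) 1).foldl
        (fun st (_ : Int) =>
          if st.2 == 1 then (st.1 ++ ornament.toList, frequency)
          else (st.1 ++ ['*'], st.2 - 1)) st1
      (st2.1 ++ ['\n'], st2.2))
    (([] : List Char), frequency)
  String.ofList (res.1 ++ List.replicate (height - 1).toNat ' ' ++ ['#'])

-- ===== PORT B =====
-- flat pass: list of pieces (each a string, as List Char); then slice into rows
def draw_tree_alt (height : Int) (ornament : String) (frequency : Int) : String :=
  let h : Int := max height 0
  let pieces := ((PySem.List.pyRange 0 (h * h) 1).foldl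
    (fun st (_ : Int) =>
      if st.2 == 1 then (st.1 ++ [ornament.toList], frequency)
      else (st.1 ++ [['*']], st.2 - 1))
    (([] : List (List Char)), frequency)).1
  let res := (PySem.List.pyRange 0 h 1).foldl
    (fun st i =>
      let n := 2 * i + 1
      (st.1 ++ [List.replicate (h - 1 - i).toNat ' '
                  ++ (PySem.List.slice pieces (some st.2) (some (st.2 + n))).flatten
                  ++ ['\n']],
       st.2 + n))
    (([] : List (List Char)), (0 : Int))
  String.ofList (res.1.flatten ++ List.replicate (height - 1).toNat ' ' ++ ['#'])

-- ===== PRECONDITION & SPEC =====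
def Spec_draw_tree (height : Int) (ornament : String) (frequency : Int) (out : String) : Prop := out = draw_tree_alt height ornament frequency
instance (height : Int) (ornament : String) (frequency : Int) (out : String) : Decidable (Spec_draw_tree height ornament frequency out) := by unfold Spec_draw_tree; infer_instance

-- ===== CLAIM (what is proved, stated in full; the proofs are below) =====
def Claim_equal_draw_tree : Prop := ∀ (height : Int) (ornament : String) (frequency : Int), Dom_draw_tree height ornament frequency → Spec_draw_tree height ornament frequency (draw_tree height ornament frequency)

-- ===== LEMMAS AND PROOFS =====

/-- The shared counter process: n steps of "emit ornament and reset when counter == 1,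
else emit a star and decrement", returning the emitted pieces and the final counter. -/
def pvGen (orn : List Char) (freq : Int) : Nat → Int → List (List Char) × Int
  | 0, c => ([], c)
  | n + 1, c =>
    if c == 1 then
      let p := pvGen orn freq n freq
      (orn :: p.1, p.2)
    else
      let p := pvGen orn freq n (c - 1)
      (['*'] :: p.1, p.2)

theorem pvGen_length (orn : List Char) (freq : Int) (n : Nat) (c : Int) :
    (pvGen orn freq n c).1.length = n := by
  induction n generalizing c with
  | zero => rfl
  | succ n ih => simp only [pvGen]; split <;> simp [ih]

theorem pvGen_add (orn : List Char) (freq : Int) (a b : Nat) (c : Int) :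
    pvGen orn freq (a + b) c =
      ((pvGen orn freq a c).1 ++ (pvGen orn freq b (pvGen orn freq a c).2).1,
       (pvGen orn freq b (pvGen orn freq a c).2).2) := by
  induction a generalizing c with
  | zero => simp [pvGen]
  | succ a ih =>
    have : a + 1 + b = (a + b) + 1 := by omega
    rw [this]
    simp only [pvGen]
    split <;> simp [ih]

/-- A's inner loop over any index list equals the counter process of the same length. -/
theorem foldA_inner (orn : List Char) (freq : Int) (l : List Int) (t : List Char) (c : Int) :
    l.foldl
      (fun st (_ : Int) =>
        if st.2 == 1 then (st.1 ++ orn, freq) else (st.1 ++ ['*'], st.2 - 1)) (t, c)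
    = (t ++ (pvGen orn freq l.length c).1.flatten, (pvGen orn freq l.length c).2) := by
  induction l generalizing t c with
  | nil => simp [pvGen]
  | cons x xs ih =>
    rw [List.foldl_cons]
    by_cases h : (c == 1) = true
    · rw [if_pos h, ih]
      simp [pvGen, h, List.append_assoc]
    · rw [if_neg h, ih]
      simp [pvGen, h, List.append_assoc]

/-- B's piece-generating loop equals the counter process of the same length. -/
theorem foldB_pieces (orn : List Char) (freq : Int) (l : List Int)
    (acc : List (List Char)) (c : Int) :
    l.foldl
      (fun st (_ : Int) =>
        if st.2 == 1 then (st.1 ++ [orn], freq) else (st.1 ++ [['*']], st.2 - 1)) (acc, c)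
    = (acc ++ (pvGen orn freq l.length c).1, (pvGen orn freq l.length c).2) := by
  induction l generalizing acc c with
  | nil => simp [pvGen]
  | cons x xs ih =>
    rw [List.foldl_cons]
    by_cases h : (c == 1) = true
    · rw [if_pos h, ih]
      simp [pvGen, h, List.append_assoc]
    · rw [if_neg h, ih]
      simp [pvGen, h, List.append_assoc]

/-- Row i of the triangle (m = height as a Nat). -/
def pvRow (orn : List Char) (freq : Int) (m i : Nat) : List Char :=
  List.replicate (m - 1 - i) ' '
    ++ (pvGen orn freq (2 * i + 1) (pvGen orn freq (i * i) freq).2).1.flatten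
    ++ ['\n']

theorem foldA_outer (orn : List Char) (freq : Int) (m : Nat) (k : Nat) (hk : k ≤ m) :
    (PySem.List.pyRange 0 (k : Int) 1).foldl
      (fun st i =>
        let st1 : List Char × Int :=
          (st.1 ++ List.replicate ((m : Int) - (i + 1)).toNat ' ', st.2)
        let st2 := (PySem.List.pyRange 0 (2 * (i + 1) - 1) 1).foldl
          (fun st (_ : Int) =>
            if st.2 == 1 then (st.1 ++ orn, freq) else (st.1 ++ ['*'], st.2 - 1)) st1
        (st2.1 ++ ['\n'], st2.2))
      (([] : List Char), freq)
    = (((List.range k).map (pvRow orn freq m)).flatten, (pvGen orn freq (k * k) freq).2) := by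
  induction k with
  | zero =>
    rw [PySem.List.pyRange_one_eq_nil (by omega)]
    simp [pvGen]
  | succ k ih =>
    have hk' : k ≤ m := by omega
    have hcast : ((k + 1 : Nat) : Int) = (k : Int) + 1 := by push_cast; ring
    rw [hcast, PySem.List.pyRange_one_succ_right (by positivity), List.foldl_append,
      ih hk', List.foldl_cons, List.foldl_nil]
    have hlen : (PySem.List.pyRange 0 (2 * ((k : Int) + 1) - 1) 1).length = 2 * k + 1 := by
      rw [PySem.List.length_pyRange_one]; omega
    have hsp : ((m : Int) - ((k : Int) + 1)).toNat = m - 1 - k := by omega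
    simp only [foldA_inner, hlen, hsp]
    have hsq : k * k + (2 * k + 1) = (k + 1) * (k + 1) := by ring
    have hsplit := pvGen_add orn freq (k * k) (2 * k + 1) freq
    rw [hsq] at hsplit
    rw [hsplit, List.range_succ]
    simp [pvRow, List.append_assoc]

theorem foldB_rows (orn : List Char) (freq : Int) (m : Nat)
    (pieces : List (List Char)) (hp : pieces = (pvGen orn freq (m * m) freq).1)
    (k : Nat) (hk : k ≤ m) :
    (PySem.List.pyRange 0 (k : Int) 1).foldl
      (fun st i =>
        let n := 2 * i + 1
        (st.1 ++ [List.replicate ((m : Int) - 1 - i).toNat ' '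
                    ++ (PySem.List.slice pieces (some st.2) (some (st.2 + n))).flatten
                    ++ ['\n']],
         st.2 + n))
      (([] : List (List Char)), (0 : Int))
    = ((List.range k).map (pvRow orn freq m), ((k * k : Nat) : Int)) := by
  induction k with
  | zero =>
    rw [PySem.List.pyRange_one_eq_nil (by omega)]
    simp
  | succ k ih =>
    have hk' : k ≤ m := by omega
    have hcast : ((k + 1 : Nat) : Int) = (k : Int) + 1 := by push_cast; ring
    rw [hcast, PySem.List.pyRange_one_succ_right (by positivity), List.foldl_append,
      ih hk', List.foldl_cons, List.foldl_nil]
    have hsp : ((m : Int) - 1 - (k : Int)).toNat = m - 1 - k := by omega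
    have hslice : PySem.List.slice pieces (some ((k * k : Nat) : Int))
        (some (((k * k : Nat) : Int) + (2 * (k : Int) + 1)))
        = (pvGen orn freq (2 * k + 1) (pvGen orn freq (k * k) freq).2).1 := by
      have h2 : (2 * (k : Int) + 1) = ((2 * k + 1 : Nat) : Int) := by push_cast; ring
      rw [h2, PySem.List.slice_natCast_add, hp]
      have h1 : (k + 1) * (k + 1) ≤ m * m := Nat.mul_le_mul hk hk
      have hm : m * m = k * k + (2 * k + 1) + (m * m - (k + 1) * (k + 1)) := by
        have e : k * k + (2 * k + 1) = (k + 1) * (k + 1) := by ring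
        omega
      have e1 := pvGen_add orn freq (k * k + (2 * k + 1)) (m * m - (k + 1) * (k + 1)) freq
      have e2 := pvGen_add orn freq (k * k) (2 * k + 1) freq
      rw [hm, e1, e2]
      simp only [List.append_assoc]
      rw [List.drop_left' (by simp [pvGen_length]),
        List.take_left' (pvGen_length orn freq (2 * k + 1) _)]
    simp only []
    rw [hslice]
    have hsq : ((k * k : Nat) : Int) + (2 * (k : Int) + 1) = (((k + 1) * (k + 1) : Nat) : Int) := by
      push_cast; ring
    simp only [hsp, hsq]
    simp [List.range_succ, pvRow]

-- ===== VERDICT (by name: the statement is the Claim_ definition above) =====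
theorem draw_tree_spec : Claim_equal_draw_tree := by
  intro height ornament frequency _
  unfold Spec_draw_tree
  by_cases hpos : 0 < height
  · -- height = m > 0
    obtain ⟨m, hm⟩ : ∃ m : Nat, height = (m : Int) := ⟨height.toNat, by omega⟩
    subst hm
    have hmax : max (m : Int) 0 = (m : Int) := by omega
    have hmm : (m : Int) * (m : Int) = ((m * m : Nat) : Int) := by push_cast; ring
    have hpieces := foldB_pieces ornament.toList frequency
      (PySem.List.pyRange 0 ((m * m : Nat) : Int) 1) [] frequency
    have hlenr : (PySem.List.pyRange 0 ((m * m : Nat) : Int) 1).length = m * m := by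
      rw [PySem.List.length_pyRange_one]; omega
    rw [hlenr] at hpieces
    simp only [draw_tree, draw_tree_alt, hmax, hmm, hpieces, List.nil_append]
    rw [foldA_outer ornament.toList frequency m m (le_refl m),
      foldB_rows ornament.toList frequency m _ rfl m (le_refl m)]
  · -- height ≤ 0: the row loops and the piece loop are all empty
    have h0 : max height 0 = 0 := by omega
    have r1 : PySem.List.pyRange 0 height 1 = [] :=
      PySem.List.pyRange_one_eq_nil (by omega)
    have r2 : PySem.List.pyRange 0 ((0 : Int) * 0) 1 = [] :=
      PySem.List.pyRange_one_eq_nil (by omega)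
    have r3 : PySem.List.pyRange 0 (0 : Int) 1 = [] :=
      PySem.List.pyRange_one_eq_nil (by omega)
    simp only [draw_tree, draw_tree_alt, h0, r1, r2, r3, List.foldl_nil, List.flatten_nil,
      List.nil_append]
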